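-- pv_equiv track=rewrite | github.com/hoixding/Mercury_router_d191g | pwdencode.py | securityEncode
-- ===== SOURCE A (Python) =====
-- def securityEncode(a, b, c):
--     d, f, h, m = "", len(a), len(b), len(c)
--     e = max(f, h)
--     for g in range(0, e):
--         l = k = 187
--         if (g >= f):
--             l = ord(b[g])
--         else:
--             if (g >= h):
--                 k = ord(a[g])
--             else:
--                 k = ord(a[g])
--                 l = ord(b[g])
--         d += c[(k ^ l) % m]
--     return d
-- ===== SOURCE B (Python) =====
-- def securityEncode(a, b, c):
--     n = max(len(a), len(b))
--     if n == 0: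
--         return ""
--     if n == 1:
--         ka = ord(a[0]) if a else 187
--         kb = ord(b[0]) if b else 187
--         return c[(ka ^ kb) % len(c)]
--     h = n // 2
--     return securityEncode(a[:h], b[:h], c) + securityEncode(a[h:], b[h:], c)
-- ===== Notes on version B (the rewrite author's own statement) =====
-- stated objective: alternative
-- what changed: Replaces A's single index loop over range(max-len) with a divide-and-conquer recursion: split both strings at the midpoint, encode each half independently and concatenate, with a one-character base case handling the missing-side default 187.
import Mathlib
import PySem

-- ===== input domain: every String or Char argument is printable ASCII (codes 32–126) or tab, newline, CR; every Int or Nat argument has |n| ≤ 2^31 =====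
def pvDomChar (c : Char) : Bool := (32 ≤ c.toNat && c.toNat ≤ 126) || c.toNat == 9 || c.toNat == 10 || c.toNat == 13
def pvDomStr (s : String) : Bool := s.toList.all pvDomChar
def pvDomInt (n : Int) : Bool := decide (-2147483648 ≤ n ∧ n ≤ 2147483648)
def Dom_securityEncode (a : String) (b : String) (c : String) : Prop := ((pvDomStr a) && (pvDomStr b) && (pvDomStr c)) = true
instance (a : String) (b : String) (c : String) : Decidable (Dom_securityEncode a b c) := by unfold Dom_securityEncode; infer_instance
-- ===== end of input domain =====

-- B replaces A's index loop with a divide-and-conquer recursion (split at the midpoint,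
-- encode each half, concatenate); an alternative decomposition, not claimed faster.

-- ===== PORT A =====
-- Indexing a[g] / b[g] / c[(k^l)%m] is exact under Pre_ (every index is provably in range there).
def securityEncode (a : String) (b : String) (c : String) : String :=
  let la := a.toList
  let lb := b.toList
  let lc := c.toList
  let f := la.length
  let h := lb.length
  let m := lc.length
  let e := max f h
  (PySem.List.pyRange 0 (e : Int) 1).foldl (fun d g =>
    let kl : Nat × Nat :=
      if g ≥ (f : Int) then (187, (PySem.List.pyGetD lb g ' ').toNat)
      else if g ≥ (h : Int) then ((PySem.List.pyGetD la g ' ').toNat, 187)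
      else ((PySem.List.pyGetD la g ' ').toNat, (PySem.List.pyGetD lb g ' ').toNat)
    d.push (lc.getD ((kl.1 ^^^ kl.2) % m) ' ')) ""

-- ===== PORT B =====
-- Recursion on the two character lists following Source B: empty → "", single column →
-- one table lookup (missing side defaults to chr(187)), otherwise split at h = n/2
-- (a[:h]/a[h:] become List.take/List.drop) and concatenate the two halves.
def altGo (fuel : Nat) (la lb lc : List Char) : String :=
  match fuel with
  | 0 => ""   -- fuel only makes the recursion structural; it is never exhausted (see altGo_toList)
  | fuel + 1 =>
    let n := max la.length lb.length
    if n = 0 then ""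
    else if n = 1 then
      let ka := (la.headD (Char.ofNat 187)).toNat
      let kb := (lb.headD (Char.ofNat 187)).toNat
      String.singleton (lc.getD ((ka ^^^ kb) % lc.length) ' ')
    else
      let h := n / 2
      altGo fuel (la.take h) (lb.take h) lc ++ altGo fuel (la.drop h) (lb.drop h) lc

def securityEncode_alt (a : String) (b : String) (c : String) : String :=
  altGo (max a.toList.length b.toList.length) a.toList b.toList c.toList

-- ===== PRECONDITION & SPEC =====
-- Pre_ excludes exactly the inputs where Python A raises ZeroDivisionError: c empty while a or b is non-empty.
def Pre_securityEncode (a : String) (b : String) (c : String) : Prop :=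
  c ≠ "" ∨ (a = "" ∧ b = "")
instance (a : String) (b : String) (c : String) : Decidable (Pre_securityEncode a b c) := by unfold Pre_securityEncode; infer_instance

def pvWitness_securityEncode : String × String × String := ("ab", "xyz", "TABLE")

def Spec_securityEncode (a : String) (b : String) (c : String) (out : String) : Prop := out = securityEncode_alt a b c
instance (a : String) (b : String) (c : String) (out : String) : Decidable (Spec_securityEncode a b c out) := by unfold Spec_securityEncode; infer_instance

-- ===== CLAIM (what is proved, stated in full; the proofs are below) =====
def Claim_equal_securityEncode : Prop := ∀ (a : String) (b : String) (c : String), Dom_securityEncode a b c → Pre_securityEncode a b c → Spec_securityEncode a b c (securityEncode a b c)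

-- ===== LEMMAS AND PROOFS =====

-- Common pointwise characterisation of the output: one table lookup per column index.
def spine (la lb lc : List Char) : List Char :=
  (List.range (max la.length lb.length)).map fun i =>
    lc.getD (((la.getD i (Char.ofNat 187)).toNat ^^^ (lb.getD i (Char.ofNat 187)).toNat) % lc.length) ' '

theorem getD_take (l : List Char) (h i : Nat) (d : Char) (hi : i < h) :
    (l.take h).getD i d = l.getD i d := by
  simp [List.getD, hi]

theorem spine_split (la lb lc : List Char) (h : Nat) (hle : h ≤ max la.length lb.length) :
    spine la lb lc = spine (la.take h) (lb.take h) lc ++ spine (la.drop h) (lb.drop h) lc := by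
  unfold spine
  have h1 : max (la.take h).length (lb.take h).length = h := by
    simp only [List.length_take]; omega
  have h2 : max (la.drop h).length (lb.drop h).length = max la.length lb.length - h := by
    simp only [List.length_drop]; omega
  rw [h1, h2]
  conv_lhs => rw [show max la.length lb.length = h + (max la.length lb.length - h) by omega,
    List.range_add, List.map_append, List.map_map]
  congr 1
  · exact List.map_congr_left fun i hi => by
      rw [getD_take _ _ _ _ (List.mem_range.mp hi), getD_take _ _ _ _ (List.mem_range.mp hi)]
  · exact List.map_congr_left fun i _ => by
      simp [Function.comp]

theorem altGo_toList : ∀ (fuel : Nat) (la lb lc : List Char),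
    max la.length lb.length ≤ fuel → (altGo fuel la lb lc).toList = spine la lb lc := by
  intro fuel
  induction fuel with
  | zero =>
    intro la lb lc hle
    have : max la.length lb.length = 0 := by omega
    simp [altGo, spine, this]
  | succ fuel ih =>
    intro la lb lc hle
    rw [altGo]
    by_cases h0 : max la.length lb.length = 0
    · simp [h0, spine]
    · by_cases h1 : max la.length lb.length = 1
      · simp only [h1]
        simp [spine, h1, List.range_succ, List.getD, List.head?_eq_getElem?]
      · simp only [h0, h1, if_false]
        have ht : max (la.take (max la.length lb.length / 2)).length
            (lb.take (max la.length lb.length / 2)).length ≤ fuel := by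
          simp only [List.length_take]; omega
        have hd : max (la.drop (max la.length lb.length / 2)).length
            (lb.drop (max la.length lb.length / 2)).length ≤ fuel := by
          simp only [List.length_drop]; omega
        rw [String.toList_append, ih _ _ _ ht, ih _ _ _ hd,
          ← spine_split la lb lc (max la.length lb.length / 2) (by omega)]

theorem foldl_push_toList {α : Type} (F : α → Char) : ∀ (l : List α) (s : String),
    (l.foldl (fun d g => d.push (F g)) s).toList = s.toList ++ l.map F := by
  intro l
  induction l with
  | nil => intro s; simp
  | cons x xs ih => intro s; simp [List.foldl, ih]

theorem securityEncode_toList (a b c : String) :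
    (securityEncode a b c).toList = spine a.toList b.toList c.toList := by
  simp only [securityEncode]
  rw [PySem.List.pyRange_one, List.foldl_map, foldl_push_toList]
  set la := a.toList
  set lb := b.toList
  set lc := c.toList
  set e := max la.length lb.length with he
  have hsub : ((e : Int) - 0).toNat = e := by omega
  unfold spine
  rw [String.toList_empty, List.nil_append, hsub]
  apply List.map_congr_left
  intro i hi
  have hie : i < e := List.mem_range.mp hi
  by_cases hf : la.length ≤ i
  · have hh : i < lb.length := by omega
    have hA : la.getD i (Char.ofNat 187) = Char.ofNat 187 := by
      simp [List.getD, List.getElem?_eq_none_iff.mpr hf]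
    have hB : lb.getD i (Char.ofNat 187) = lb[i] := by
      simp [List.getD, List.getElem?_eq_getElem hh]
    simp [hf, hh, PySem.List.pyGetD, PySem.List.pyGet?, PySem.List.pyIdx?]
  · have hfa : i < la.length := by omega
    have hA : la.getD i (Char.ofNat 187) = la[i] := by
      simp [List.getD, hfa]
    by_cases hh : lb.length ≤ i
    · have hB : lb.getD i (Char.ofNat 187) = Char.ofNat 187 := by
        simp [List.getD, List.getElem?_eq_none_iff.mpr hh]
      simp [hf, hh, PySem.List.pyGetD, PySem.List.pyGet?, PySem.List.pyIdx?,
        hfa]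
    · have hhb : i < lb.length := by omega
      have hB : lb.getD i (Char.ofNat 187) = lb[i] := by
        simp [List.getD, List.getElem?_eq_getElem hhb]
      simp [hf, hh, PySem.List.pyGetD, PySem.List.pyGet?, PySem.List.pyIdx?,
        hfa, hhb]

-- ===== VERDICT (by name: the statement is the Claim_ definition above) =====
theorem securityEncode_spec : Claim_equal_securityEncode := by
  intro a b c _ _
  unfold Spec_securityEncode securityEncode_alt
  exact String.toList_inj.mp ((securityEncode_toList a b c).trans (altGo_toList _ _ _ _ le_rfl).symm)
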